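-- pv_equiv track=rewrite | github.com/Blightningstar/discord_bot | discord_bot/music_bot/music_service.py | find_best_song_format
-- ===== SOURCE A (Python) =====
-- def find_best_song_format(format_list: list) -> str:
--     """
--     Util Method that selects the best audio quality for a song based on audio_channels available,
--     quality of audio & codification of the video.
--     Params:
--         * (List) format_list: A list of the different quality of videos a Youtube video has available
--     Returns:
--         * (String): The url of the best quality audio based on different parameters
--     """
--     for f in format_list:
--         if f.get("url") and f.get("acodec") and f.get("acodec") != "none":
--             return f["url"]
--     for f in format_list:
--         if f.get("url"):
--             return f["url"]
--     return None
-- ===== SOURCE B (Python) =====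
-- def find_best_song_format(format_list: list) -> str:
--     """Single pass: return immediately on the first format with a real audio
--     codec; remember (once) the first url-bearing format as fallback."""
--     fallback = None
--     for f in format_list:
--         url = f.get("url")
--         if url:
--             acodec = f.get("acodec")
--             if acodec and acodec != "none":
--                 return url
--             if fallback is None:
--                 fallback = url
--     return fallback
-- ===== Notes on version B (the rewrite author's own statement) =====
-- stated objective: simpler
-- what changed: Replaced A's two full passes over format_list by a single loop that returns immediately on the first preferred format and remembers the first url-bearing format once as a fallback.
import Mathlib
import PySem

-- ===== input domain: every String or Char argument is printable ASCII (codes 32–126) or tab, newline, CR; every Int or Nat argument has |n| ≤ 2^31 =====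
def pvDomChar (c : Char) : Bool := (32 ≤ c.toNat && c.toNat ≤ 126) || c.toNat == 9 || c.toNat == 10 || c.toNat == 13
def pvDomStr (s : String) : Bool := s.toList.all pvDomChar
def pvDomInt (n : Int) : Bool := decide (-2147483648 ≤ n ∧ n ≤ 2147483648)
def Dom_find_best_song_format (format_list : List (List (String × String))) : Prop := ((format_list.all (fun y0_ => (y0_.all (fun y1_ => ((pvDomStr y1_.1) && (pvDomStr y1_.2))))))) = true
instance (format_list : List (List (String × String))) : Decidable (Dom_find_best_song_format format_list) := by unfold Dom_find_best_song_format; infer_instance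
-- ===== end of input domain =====

-- B is a single pass (return first preferred format's url, else first url seen, kept once as a
-- fallback) instead of A's two full passes; return values are provably equal on all inputs.

-- ===== PORT A =====
-- Python truthiness of `d.get(k)` for a str-valued dict: present and nonempty.
def pyTruthy (o : Option String) : Bool :=
  match o with
  | none => false
  | some s => !(s == "")

-- f.get(k) for a dict given as its item list (first match, as PySem.Dict).
def dget (f : List (String × String)) (k : String) : Option String :=
  PySem.Dict.get? (PySem.Dict.mk f) k

-- first loop of A: first format with truthy url and a real acodec
def fbsA_loop1 : List (List (String × String)) → Option String
  | [] => none
  | f :: rest =>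
    if pyTruthy (dget f "url") && pyTruthy (dget f "acodec")
        && !((dget f "acodec").getD "" == "none") then
      some ((dget f "url").getD "")
    else
      fbsA_loop1 rest

-- second loop of A: first format with truthy url
def fbsA_loop2 : List (List (String × String)) → Option String
  | [] => none
  | f :: rest =>
    if pyTruthy (dget f "url") then some ((dget f "url").getD "")
    else fbsA_loop2 rest

def find_best_song_format (format_list : List (List (String × String))) : Option String :=
  match fbsA_loop1 format_list with
  | some u => some u
  | none => fbsA_loop2 format_list

-- ===== PORT B =====
-- single pass with a once-set fallback, mirroring Source B
def fbsB_loop : List (List (String × String)) → Option String → Option String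
  | [], fallback => fallback
  | f :: rest, fallback =>
    match dget f "url" with
    | some u =>
      if !(u == "") then
        if pyTruthy (dget f "acodec") && !((dget f "acodec").getD "" == "none") then
          some u
        else
          fbsB_loop rest (if fallback = none then some u else fallback)
      else fbsB_loop rest fallback
    | none => fbsB_loop rest fallback

def find_best_song_format_alt (format_list : List (List (String × String))) : Option String :=
  fbsB_loop format_list none

-- ===== PRECONDITION & SPEC =====
def Spec_find_best_song_format (format_list : List (List (String × String))) (out : Option String) : Prop := out = find_best_song_format_alt format_list
instance (format_list : List (List (String × String))) (out : Option String) : Decidable (Spec_find_best_song_format format_list out) := by unfold Spec_find_best_song_format; infer_instance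

-- ===== CLAIM (what is proved, stated in full; the proofs are below) =====
def Claim_equal_find_best_song_format : Prop := ∀ (format_list : List (List (String × String))), Dom_find_best_song_format format_list → Spec_find_best_song_format format_list (find_best_song_format format_list)

-- ===== LEMMAS AND PROOFS =====

-- B's single pass equals: first-preferred url if any, else the incoming fallback, else A's
-- first-url scan.
theorem fbsB_loop_eq (l : List (List (String × String))) (fb : Option String) :
    fbsB_loop l fb =
      match fbsA_loop1 l with
      | some u => some u
      | none => match fb with
                | some v => some v
                | none => fbsA_loop2 l := by
  induction l generalizing fb with
  | nil => cases fb <;> simp [fbsB_loop, fbsA_loop1, fbsA_loop2]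
  | cons f rest ih =>
    simp only [fbsB_loop, fbsA_loop1, fbsA_loop2]
    cases hu : dget f "url" with
    | none => simp [pyTruthy, ih]
    | some u =>
      by_cases hne : u = ""
      · subst hne; simp [pyTruthy, ih]
      · simp only [pyTruthy, ih]
        split_ifs <;> cases fb <;> simp_all

-- ===== VERDICT (by name: the statement is the Claim_ definition above) =====
theorem find_best_song_format_spec : Claim_equal_find_best_song_format := by
  intro l _
  unfold Spec_find_best_song_format find_best_song_format find_best_song_format_alt
  rw [fbsB_loop_eq]
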